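-- pv_equiv track=rewrite | github.com/mkopec87/advent_of_code | src/2024/21/2024_21.py | map_all_codes
-- ===== SOURCE A (Python) =====
-- def map_all_codes(code, keyboard_mapping):
--     if code[0] != "A":
--         code = "A" + code
--     new_codes = {""}
--     moves = list(zip(code, code[1:]))
--     for move in moves:
--         mappings = keyboard_mapping[move]
--         if not mappings:
--             mappings = {""}
--
--         next_codes = set()
--         for mapping in mappings:
--             for code in new_codes:
--                 next_codes.add(code + mapping + "A")
--         new_codes = next_codes
--     return new_codes
-- ===== SOURCE B (Python) =====
-- def map_all_codes(code, keyboard_mapping):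
--     if code[0] != "A":
--         code = "A" + code
--     lists = [list(keyboard_mapping[move]) or [""] for move in zip(code, code[1:])]
--     # mixed-radix direct indexing: combination #i picks element (i // weight) % len from each list
--     weights = []
--     total = 1
--     for l in lists:
--         weights.append(total)
--         total *= len(l)
--     out = set()
--     for i in range(total):
--         out.add("".join(l[(i // w) % len(l)] + "A" for l, w in zip(lists, weights)))
--     return out
-- ===== Notes on version B (the rewrite author's own statement) =====
-- stated objective: alternative
-- what changed: A folds over the moves maintaining a growing set of partial codes with a nested product loop per move; B never builds intermediate partial-code collections: it computes mixed-radix weights from the per-move list lengths and directly enumerates combination #i for i in range(total) by indexed digit extraction (i//weight % len), assembling each full code in one join.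
import Mathlib
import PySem

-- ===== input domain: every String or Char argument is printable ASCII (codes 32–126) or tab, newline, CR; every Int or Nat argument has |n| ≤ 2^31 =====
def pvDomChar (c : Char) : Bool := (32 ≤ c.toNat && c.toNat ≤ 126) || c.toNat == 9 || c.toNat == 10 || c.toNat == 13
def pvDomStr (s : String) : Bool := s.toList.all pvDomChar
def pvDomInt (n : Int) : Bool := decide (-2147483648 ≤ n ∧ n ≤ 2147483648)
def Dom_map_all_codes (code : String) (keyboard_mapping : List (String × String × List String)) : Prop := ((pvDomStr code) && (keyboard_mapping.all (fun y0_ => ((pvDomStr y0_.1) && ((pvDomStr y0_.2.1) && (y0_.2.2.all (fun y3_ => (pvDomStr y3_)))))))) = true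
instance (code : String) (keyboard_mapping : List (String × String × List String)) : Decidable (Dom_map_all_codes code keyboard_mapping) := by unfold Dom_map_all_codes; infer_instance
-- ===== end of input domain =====

-- B replaces A's incremental product-set folding by direct mixed-radix indexed enumeration of
-- every combination (no intermediate partial-code collections); alternative, not faster.


-- shared helpers (both Pythons compute these identically):
-- 'A' + code unless it already starts with 'A'  (code[0] itself raises on "" — excluded by Pre_)
def pvFull (cs : List Char) : List Char :=
  match cs with
  | [] => []
  | c :: r => if c ≠ 'A' then 'A' :: c :: r else c :: r

-- keyboard_mapping[(a, b)] : first match in the association list (KeyError — i.e. no match — is excluded by Pre_)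
def pvLookup (km : List (String × String × List String)) (a b : Char) : List String :=
  ((km.find? (fun e => e.1 == String.ofList [a] && e.2.1 == String.ofList [b])).map (fun e => e.2.2)).getD []

-- A's 'if not mappings: mappings = {""}' / B's 'keyboard_mapping[move] or [""]', as char lists
def pvMaps (km : List (String × String × List String)) (mv : Char × Char) : List (List Char) :=
  let v := pvLookup km mv.1 mv.2
  if v = [] then [[]] else v.map (·.toList)

-- ===== PORT A =====
-- forward fold over the moves; at every move a fresh set is built by the nested add-loop
def map_all_codes (code : String) (keyboard_mapping : List (String × String × List String)) : List String :=
  let full := pvFull code.toList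
  let moves := full.zip (PySem.List.slice full (some 1) none)   -- zip(code, code[1:])
  (moves.foldl
      (fun new_codes mv =>
        (pvMaps keyboard_mapping mv).foldl
          (fun next m =>
            new_codes.foldl (fun nxt c => PySem.Set.add nxt (c ++ m ++ ['A'])) next)
          PySem.Set.empty)
      (PySem.Set.ofList [[]])).map String.ofList

-- ===== PORT B =====
-- mixed-radix direct enumeration: weights are prefix products of the per-move list lengths;
-- combination #i picks element (i / weight) % length from each list.  All indices are
-- nonnegative Python ints, so Nat '/' and '%' coincide exactly with Python's '//' and '%'.
def map_all_codes_alt (code : String) (keyboard_mapping : List (String × String × List String)) : List String :=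
  let full := pvFull code.toList
  let lists := (full.zip (PySem.List.slice full (some 1) none)).map (pvMaps keyboard_mapping)
  let wt := lists.foldl (fun p l => (p.1 ++ [p.2], p.2 * l.length)) (([] : List Nat), 1)
  -- wt.1 = weights, wt.2 = total; 'for i in range(total): out.add("".join(...))'
  ((List.range wt.2).foldl
      (fun out i =>
        PySem.Set.add out
          ((lists.zip wt.1).flatMap (fun lw => lw.1.getD ((i / lw.2) % lw.1.length) [] ++ ['A'])))
      PySem.Set.empty).map String.ofList

-- ===== PRECONDITION & SPEC =====
-- Pre_ excludes exactly the inputs where Python A raises: "" (IndexError on code[0]) and a move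
-- missing from keyboard_mapping (KeyError).
def Pre_map_all_codes (code : String) (keyboard_mapping : List (String × String × List String)) : Prop :=
  code.toList ≠ [] ∧
  ∀ mv ∈ (pvFull code.toList).zip (PySem.List.slice (pvFull code.toList) (some 1) none),
    (keyboard_mapping.find? (fun e => e.1 == String.ofList [mv.1] && e.2.1 == String.ofList [mv.2])).isSome = true
instance (code : String) (keyboard_mapping : List (String × String × List String)) : Decidable (Pre_map_all_codes code keyboard_mapping) := by unfold Pre_map_all_codes; infer_instance

def pvWitness_map_all_codes : String × (List (String × String × List String)) :=
  ("02", [("A", "0", ["<"]), ("0", "2", ["^"])])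

def Spec_map_all_codes (code : String) (keyboard_mapping : List (String × String × List String)) (out : List String) : Prop := out = map_all_codes_alt code keyboard_mapping
instance (code : String) (keyboard_mapping : List (String × String × List String)) (out : List String) : Decidable (Spec_map_all_codes code keyboard_mapping out) := by unfold Spec_map_all_codes; infer_instance

-- ===== CLAIM (what is proved, stated in full; the proofs are below) =====
def Claim_equal_map_all_codes : Prop := ∀ (code : String) (keyboard_mapping : List (String × String × List String)), Dom_map_all_codes code keyboard_mapping → Pre_map_all_codes code keyboard_mapping → Spec_map_all_codes code keyboard_mapping (map_all_codes code keyboard_mapping)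

-- ===== LEMMAS AND PROOFS =====

-- A's per-move stage, as a plain list (no dedup): all extensions of L by the mappings M
def pvStep (L : List (List Char)) (M : List (List Char)) : List (List Char) :=
  M.flatMap (fun m => L.map (fun c => c ++ m ++ ['A']))

-- deduplicating the input of a map does not change the deduplicated output
theorem pv_ofList_map_ofList {α β : Type} [BEq α] [LawfulBEq α] [BEq β] [LawfulBEq β] (f : α → β) (L : List α) :
    PySem.Set.ofList ((PySem.Set.ofList L).map f) = PySem.Set.ofList (L.map f) := by
  induction L using List.reverseRecOn with
  | nil => rfl
  | append_singleton L x ih =>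
    by_cases hx : x ∈ L
    · rw [PySem.Set.ofList_append_singleton, PySem.Set.add_of_mem (by simpa [PySem.Set.mem_ofList] using hx), ih,
        List.map_append, List.map_singleton, PySem.Set.ofList_append_singleton,
        PySem.Set.add_of_mem (by simp [PySem.Set.mem_ofList]; exact ⟨x, hx, rfl⟩)]
    · rw [PySem.Set.ofList_append_singleton, PySem.Set.add_of_not_mem (by simpa [PySem.Set.mem_ofList] using hx),
        List.map_append, List.map_singleton, PySem.Set.ofList_append_singleton, ih,
        List.map_append, List.map_singleton, PySem.Set.ofList_append_singleton]

-- same for update with an arbitrary seed set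
theorem pv_update_map_ofList {α β : Type} [BEq α] [LawfulBEq α] [BEq β] [LawfulBEq β] (s : PySem.Set β) (f : α → β) (L : List α) :
    PySem.Set.update s ((PySem.Set.ofList L).map f) = PySem.Set.update s (L.map f) := by
  rw [PySem.Set.update_eq_append_filter, PySem.Set.update_eq_append_filter, pv_ofList_map_ofList]

-- deduplicating the input of a whole stage does not change the deduplicated stage output
theorem pv_update_step_ofList (s : PySem.Set (List Char)) (M : List (List Char)) (L : List (List Char)) :
    PySem.Set.update s (pvStep (PySem.Set.ofList L) M) = PySem.Set.update s (pvStep L M) := by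
  induction M generalizing s with
  | nil => rfl
  | cons m M ih =>
    simp only [pvStep, List.flatMap_cons] at *
    rw [PySem.Set.update_append, PySem.Set.update_append, pv_update_map_ofList, ih]

-- A's nested add-loop over one move is 'ofList (pvStep S M)'
theorem pv_stage_eq (M : List (List Char)) (S init : PySem.Set (List Char)) :
    M.foldl (fun next m => S.foldl (fun nxt c => PySem.Set.add nxt (c ++ m ++ ['A'])) next) init
      = PySem.Set.update init (pvStep S M) := by
  induction M generalizing init with
  | nil => simp [pvStep, PySem.Set.update_nil]
  | cons m M ih =>
    simp only [List.foldl_cons, pvStep, List.flatMap_cons]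
    rw [← PySem.Set.update_map_eq_foldl_add, ih, PySem.Set.update_append]
    rfl

-- A's whole fold equals the dedup of the undeduplicated forward product
theorem pv_foldA_eq (Ms : List (List (List Char))) (L : List (List Char)) :
    Ms.foldl (fun S M => PySem.Set.update PySem.Set.empty (pvStep S M)) (PySem.Set.ofList L)
      = PySem.Set.ofList (Ms.foldl pvStep L) := by
  induction Ms generalizing L with
  | nil => rfl
  | cons M Ms ih =>
    simp only [List.foldl_cons]
    have h : PySem.Set.update PySem.Set.empty (pvStep (PySem.Set.ofList L) M)
        = PySem.Set.ofList (pvStep L M) := by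
      rw [pv_update_step_ofList]; exact (PySem.Set.update_nil_left _)
    rw [h, ih]

-- the suffix products of a tail of moves (proof-only characterisation)
def pvSuf (Ms : List (List (List Char))) : List (List Char) :=
  Ms.foldr (fun M acc => acc.flatMap (fun s => M.map (fun m => m ++ 'A' :: s))) [[]]

-- exchange: the forward prefix product equals every prefix of L glued to the backward suffix product
theorem pv_foldA_eq_suf (Ms : List (List (List Char))) (L : List (List Char)) :
    Ms.foldl pvStep L = (pvSuf Ms).flatMap (fun s => L.map (fun c => c ++ s)) := by
  induction Ms generalizing L with
  | nil => simp [pvSuf]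
  | cons M Ms ih =>
    have hsuf : pvSuf (M :: Ms) = (pvSuf Ms).flatMap (fun s => M.map (fun m => m ++ 'A' :: s)) := rfl
    rw [List.foldl_cons, ih, hsuf, List.flatMap_assoc]
    apply List.flatMap_congr
    intro s _
    simp [pvStep, List.map_flatMap, List.flatMap_map, List.map_map, Function.comp_def, List.append_assoc]

-- ===== B-side characterisation: the mixed-radix enumeration =====

-- the weights B computes: prefix products of the list lengths, starting at w
def pvWeights : List (List (List Char)) → Nat → List Nat
  | [], _ => []
  | M :: rest, w => w :: pvWeights rest (w * M.length)

def pvProd : List (List (List Char)) → Nat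
  | [] => 1
  | M :: rest => M.length * pvProd rest

-- combination #i, decoded recursively (least-significant digit = first move)
def pvDecode : List (List (List Char)) → Nat → List Char
  | [], _ => []
  | M :: rest, i => M.getD (i % M.length) [] ++ 'A' :: pvDecode rest (i / M.length)

-- B's weights/total loop computes (pvWeights, pvProd)
theorem pv_weights_fold (Ms : List (List (List Char))) (ws : List Nat) (w : Nat) :
    Ms.foldl (fun p l => (p.1 ++ [p.2], p.2 * l.length)) (ws, w)
      = (ws ++ pvWeights Ms w, w * pvProd Ms) := by
  induction Ms generalizing ws w with
  | nil => simp [pvWeights, pvProd]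
  | cons M Ms ih =>
    simp only [List.foldl_cons, ih, pvWeights, pvProd]
    simp [List.append_assoc, Nat.mul_assoc]

-- B's join over (lists, weights) pairs is the recursive decode
theorem pv_flatpick (Ms : List (List (List Char))) (w : Nat) (i : Nat) :
    (Ms.zip (pvWeights Ms w)).flatMap (fun lw => lw.1.getD ((i / lw.2) % lw.1.length) [] ++ ['A'])
      = pvDecode Ms (i / w) := by
  induction Ms generalizing w with
  | nil => rfl
  | cons M rest ih =>
    simp only [pvWeights, List.zip_cons_cons, List.flatMap_cons, pvDecode, ih,
      Nat.div_div_eq_div_mul]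
    simp

-- picking every index of l in order is l itself
theorem pv_range_getD {α : Type} (l : List α) (d : α) :
    (List.range l.length).map (fun r => l.getD r d) = l := by
  apply List.ext_getElem
  · simp
  · intro j h1 h2
    simp [List.getD, List.getElem?_eq_getElem h2]

-- splitting the enumeration of range (|M| * T) by the most significant part
theorem pv_range_mul (M : List (List Char)) (rest : List (List (List Char))) (T : Nat) :
    (List.range (M.length * T)).map (pvDecode (M :: rest))
      = (List.range T).flatMap (fun q => M.map (fun m => m ++ 'A' :: pvDecode rest q)) := by
  by_cases hM : M.length = 0
  · rw [List.length_eq_zero_iff.mp hM]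
    simp
  · induction T with
    | zero => simp
    | succ T ih =>
      rw [Nat.mul_succ, List.range_add, List.map_append, ih, List.range_succ,
        List.flatMap_append, List.flatMap_singleton, List.map_map]
      congr 1
      have h1 : List.map (pvDecode (M :: rest) ∘ fun x => M.length * T + x) (List.range M.length)
          = (List.range M.length).map (fun r => M.getD r [] ++ 'A' :: pvDecode rest T) := by
        apply List.map_congr_left
        intro r hr
        rw [List.mem_range] at hr
        simp only [Function.comp_def, pvDecode]
        rw [Nat.mul_add_div (Nat.pos_of_ne_zero hM), Nat.mul_add_mod,
          Nat.div_eq_of_lt hr, Nat.mod_eq_of_lt hr]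
        simp
      rw [h1,
        show (fun r => M.getD r [] ++ 'A' :: pvDecode rest T)
            = ((fun m => m ++ 'A' :: pvDecode rest T) ∘ fun r => M.getD r []) from rfl,
        ← List.map_map, pv_range_getD]

-- the whole enumeration, in order, is the suffix product
theorem pv_enum_eq_suf (Ms : List (List (List Char))) :
    (List.range (pvProd Ms)).map (pvDecode Ms) = pvSuf Ms := by
  induction Ms with
  | nil => rfl
  | cons M rest ih =>
    have : pvSuf (M :: rest) = (pvSuf rest).flatMap (fun s => M.map (fun m => m ++ 'A' :: s)) := rfl
    rw [this, ← ih, List.flatMap_map, pvProd, pv_range_mul]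

-- ===== VERDICT (by name: the statement is the Claim_ definition above) =====
theorem map_all_codes_spec : Claim_equal_map_all_codes := by
  intro code km _ _
  simp only [Spec_map_all_codes, map_all_codes, map_all_codes_alt]
  congr 1
  set Ms := ((pvFull code.toList).zip (PySem.List.slice (pvFull code.toList) (some 1) none)).map (pvMaps km) with hMs
  -- A's side: fold of deduplicated stages = dedup of the forward product = dedup of the suffix product
  have hA : ((pvFull code.toList).zip (PySem.List.slice (pvFull code.toList) (some 1) none)).foldl
      (fun new_codes mv =>
        (pvMaps km mv).foldl
          (fun next m => new_codes.foldl (fun nxt c => PySem.Set.add nxt (c ++ m ++ ['A'])) next)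
          PySem.Set.empty)
      (PySem.Set.ofList [[]])
    = PySem.Set.ofList (pvSuf Ms) := by
    rw [PySem.List.foldl_congr_mem _ _ _ _ (fun S mv _ => pv_stage_eq (pvMaps km mv) S PySem.Set.empty),
      ← List.foldl_map (f := pvMaps km) (g := fun S M => PySem.Set.update PySem.Set.empty (pvStep S M)),
      ← hMs, pv_foldA_eq, pv_foldA_eq_suf]
    simp [pvSuf]
  -- B's side: add-loop over range total = dedup of the enumeration = dedup of the suffix product
  have hB : (List.range (Ms.foldl (fun p l => (p.1 ++ [p.2], p.2 * l.length)) (([] : List Nat), 1)).2).foldl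
      (fun out i =>
        PySem.Set.add out
          ((Ms.zip (Ms.foldl (fun p l => (p.1 ++ [p.2], p.2 * l.length)) (([] : List Nat), 1)).1).flatMap
            (fun lw => lw.1.getD ((i / lw.2) % lw.1.length) [] ++ ['A'])))
      PySem.Set.empty
    = PySem.Set.ofList (pvSuf Ms) := by
    rw [pv_weights_fold]
    simp only [List.nil_append, Nat.one_mul]
    have hpick : (List.range (pvProd Ms)).map
        (fun i => (Ms.zip (pvWeights Ms 1)).flatMap (fun lw => lw.1.getD ((i / lw.2) % lw.1.length) [] ++ ['A']))
        = (List.range (pvProd Ms)).map (pvDecode Ms) := by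
      apply List.map_congr_left
      intro i _
      rw [pv_flatpick, Nat.div_one]
    rw [← PySem.Set.update_map_eq_foldl_add, hpick, pv_enum_eq_suf]
    exact PySem.Set.update_nil_left _
  rw [hA, hB]
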